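-- pv_equiv track=rewrite | github.com/luyihsien/leetcodepy | 151/1..py | numSmallerByFrequency
-- ===== SOURCE A (Python) =====
-- def numSmallerByFrequency(queries, words):
--     c=[i.count(min(i)) for i in words]
--     c.sort(reverse=True)
--     d=[i.count(min(i)) for i in queries]
--     n=len(d)
--     ans=[]
--     for i in range(n):
--         res=0
--         for j in c:
--             if d[i]<j:
--                 res+=1
--             else:
--                 break
--         if res>=0:
--             ans.append(res)
--     return ans
-- ===== SOURCE B (Python) =====
-- def numSmallerByFrequency(queries, words):
--     # sort the word frequencies once, then answer each query by binary search
--     ws = sorted(w.count(min(w)) for w in words)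
--     n = len(ws)
--     out = []
--     for q in queries:
--         fq = q.count(min(q))
--         lo, hi = 0, n
--         while lo < hi:
--             mid = (lo + hi) // 2
--             if ws[mid] <= fq:
--                 lo = mid + 1
--             else:
--                 hi = mid
--         out.append(n - lo)
--     return out
-- ===== Notes on version B (the rewrite author's own statement) =====
-- stated objective: faster
-- what changed: A scans the descending-sorted frequency list linearly for every query; B sorts the word frequencies ascending once and answers each query with a hand-written binary search (count of frequencies > query's = n - upper bound index).
import Mathlib
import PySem

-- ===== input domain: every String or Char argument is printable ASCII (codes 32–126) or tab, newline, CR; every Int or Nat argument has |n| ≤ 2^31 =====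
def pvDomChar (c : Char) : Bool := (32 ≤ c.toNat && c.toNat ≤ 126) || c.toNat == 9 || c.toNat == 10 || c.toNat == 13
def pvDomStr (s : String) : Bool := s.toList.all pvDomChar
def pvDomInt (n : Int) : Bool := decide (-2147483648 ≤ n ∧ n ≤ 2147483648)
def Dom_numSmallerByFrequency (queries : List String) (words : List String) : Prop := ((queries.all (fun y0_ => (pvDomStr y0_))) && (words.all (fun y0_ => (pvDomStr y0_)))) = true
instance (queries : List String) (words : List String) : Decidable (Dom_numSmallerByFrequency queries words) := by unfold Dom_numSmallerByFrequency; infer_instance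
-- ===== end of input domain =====

-- B replaces A's per-query linear scan of the descending-sorted frequency list by one
-- ascending sort plus a binary search per query (objective: faster, asymptotic).

-- ===== PORT A =====
-- i.count(min(i)): min over the characters of i, then count of that character.
-- min("") raises ValueError in Python; the 'none' branch (value 0) is unreachable under Pre_.
def pvFreqA (s : String) : Int :=
  match PySem.List.min? s.toList (fun c => c) with
  | some m => (s.toList.count m : Int)
  | none => 0

-- the inner 'for j in c: if d[i]<j: res+=1 else: break' loop
def pvLoopA (q : Int) : List Int → Int
  | [] => 0
  | j :: rest => if q < j then 1 + pvLoopA q rest else 0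

-- A iterates i over range(len(d)) reading d[i]; folding over d in order visits the same values.
def numSmallerByFrequency (queries : List String) (words : List String) : List Int :=
  let c := PySem.List.sorted (words.map pvFreqA) (fun x => x) true
  let d := queries.map pvFreqA
  d.foldl (fun ans di =>
    let res := pvLoopA di c
    if 0 ≤ res then ans ++ [res] else ans) []

-- ===== PORT B =====
-- same per-string frequency as Source B's 'q.count(min(q))'
def pvFreqB (s : String) : Int :=
  match PySem.List.min? s.toList (fun c => c) with
  | some m => (s.toList.count m : Int)
  | none => 0

-- Source B's 'while lo < hi' binary search; ws[mid] is in range (lo ≤ mid < hi ≤ len ws)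
-- so getD's default 0 is never read.
-- the fuel (hi - lo at the call) is only a structural-termination device: each
-- iteration shrinks hi - lo, so the fuel never runs out.
def pvBSAux (ws : List Int) (fq : Int) : Nat → Nat → Nat → Nat
  | 0, lo, _ => lo
  | fuel + 1, lo, hi =>
    if lo < hi then
      let mid := (lo + hi) / 2
      if ws.getD mid 0 ≤ fq then pvBSAux ws fq fuel (mid + 1) hi
      else pvBSAux ws fq fuel lo mid
    else lo

def pvBS (ws : List Int) (fq : Int) (lo hi : Nat) : Nat :=
  pvBSAux ws fq (hi - lo) lo hi

def numSmallerByFrequency_alt (queries : List String) (words : List String) : List Int :=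
  let ws := PySem.List.sorted (words.map pvFreqB) (fun x => x) false
  let n := ws.length
  queries.foldl (fun out q =>
    let fq := pvFreqB q
    let lo := pvBS ws fq 0 n
    out ++ [(n : Int) - (lo : Int)]) []

-- ===== PRECONDITION & SPEC =====
-- Pre_ excludes exactly the inputs where Python A raises: min('') is a ValueError,
-- so every query and every word must be a nonempty string.
def Pre_numSmallerByFrequency (queries : List String) (words : List String) : Prop :=
  (∀ s ∈ queries, s ≠ "") ∧ (∀ s ∈ words, s ≠ "")
instance (queries : List String) (words : List String) : Decidable (Pre_numSmallerByFrequency queries words) := by unfold Pre_numSmallerByFrequency; infer_instance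

def pvWitness_numSmallerByFrequency : List String × List String := (["cbd"], ["zaaaz", "bbb"])

def Spec_numSmallerByFrequency (queries : List String) (words : List String) (out : List Int) : Prop := out = numSmallerByFrequency_alt queries words
instance (queries : List String) (words : List String) (out : List Int) : Decidable (Spec_numSmallerByFrequency queries words out) := by unfold Spec_numSmallerByFrequency; infer_instance

-- ===== CLAIM (what is proved, stated in full; the proofs are below) =====
def Claim_equal_numSmallerByFrequency : Prop := ∀ (queries : List String) (words : List String), Dom_numSmallerByFrequency queries words → Pre_numSmallerByFrequency queries words → Spec_numSmallerByFrequency queries words (numSmallerByFrequency queries words)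

-- ===== LEMMAS AND PROOFS =====

-- A's break-loop on a descending-sorted list counts all the elements greater than q.
theorem pvLoopA_eq_countP (q : Int) (c : List Int)
    (hc : List.Pairwise (fun a b => b ≤ a) c) :
    pvLoopA q c = (c.countP (fun j => decide (q < j)) : Int) := by
  induction c with
  | nil => simp [pvLoopA]
  | cons j rest ih =>
    rcases List.pairwise_cons.mp hc with ⟨h1, h2⟩
    by_cases hq : q < j
    · rw [List.countP_cons_of_pos (by simpa using hq)]
      simp [pvLoopA, hq, ih h2]; ring
    · have hz : rest.countP (fun j => decide (q < j)) = 0 := by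
        apply List.countP_eq_zero.mpr
        intro x hx
        have := h1 x hx
        simp; omega
      rw [List.countP_cons_of_neg (by simpa using hq)]
      simp [pvLoopA, hq, hz]

theorem pvLoopA_nonneg (q : Int) (c : List Int) : 0 ≤ pvLoopA q c := by
  induction c with
  | nil => simp [pvLoopA]
  | cons j rest ih =>
    by_cases hq : q < j
    · simp [pvLoopA, hq]; omega
    · simp [pvLoopA, hq]

-- an ascending-sorted list is index-monotone
theorem sorted_getElem_mono (ws : List Int)
    (hs : List.Pairwise (fun a b => a ≤ b) ws)
    {i j : Nat} (hij : i ≤ j) (hj : j < ws.length) : ws[i]'(by omega) ≤ ws[j] := by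
  rcases Nat.lt_or_ge i j with h | h
  · exact List.pairwise_iff_getElem.mp hs i j (by omega) hj h
  · have : i = j := by omega
    subst this; rfl

-- Source B's binary search, characterised: every index below the result holds a value ≤ fq,
-- every index at or above it a value > fq.
theorem pvBSAux_char (ws : List Int) (fq : Int)
    (hs : List.Pairwise (fun a b => a ≤ b) ws) :
    ∀ fuel lo hi, hi - lo ≤ fuel → lo ≤ hi → hi ≤ ws.length →
    (∀ i, i < lo → ∀ h : i < ws.length, ws[i] ≤ fq) →
    (∀ i, hi ≤ i → ∀ h : i < ws.length, fq < ws[i]) →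
    pvBSAux ws fq fuel lo hi ≤ ws.length ∧
    (∀ i, (h : i < ws.length) → i < pvBSAux ws fq fuel lo hi → ws[i] ≤ fq) ∧
    (∀ i, (h : i < ws.length) → pvBSAux ws fq fuel lo hi ≤ i → fq < ws[i]) := by
  intro fuel
  induction fuel with
  | zero =>
    intro lo hi hf hlo hhi hbelow habove
    have : lo = hi := by omega
    subst this
    simp only [pvBSAux]
    exact ⟨by omega,
      fun i h hilo => hbelow i hilo h,
      fun i h hloi => habove i (by omega) h⟩
  | succ fuel ih =>
    intro lo hi hf hlo hhi hbelow habove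
    by_cases hlt : lo < hi
    · rw [pvBSAux]
      by_cases hmid : ws.getD ((lo + hi) / 2) 0 ≤ fq
      · simp only [if_pos hlt, if_pos hmid]
        refine ih _ _ (by omega) (by omega) hhi ?_ habove
        intro i hi' h
        have hmr : (lo + hi) / 2 < ws.length := by omega
        have hle : ws[i]'h ≤ ws[(lo + hi) / 2]'hmr :=
          sorted_getElem_mono ws hs (by omega) hmr
        have := List.getD_eq_getElem ws 0 hmr
        omega
      · simp only [if_pos hlt, if_neg hmid]
        refine ih _ _ (by omega) (by omega) (by omega) hbelow ?_
        intro i hmi h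
        have hmr : (lo + hi) / 2 < ws.length := by omega
        have hge : ws[(lo + hi) / 2]'hmr ≤ ws[i]'h :=
          sorted_getElem_mono ws hs hmi h
        have := List.getD_eq_getElem ws 0 hmr
        omega
    · rw [pvBSAux]; simp only [if_neg hlt]
      exact ⟨by omega,
        fun i h hilo => hbelow i hilo h,
        fun i h hloi => habove i (by omega) h⟩

theorem pvBS_char (ws : List Int) (fq : Int)
    (hs : List.Pairwise (fun a b => a ≤ b) ws) :
    ∀ lo hi, lo ≤ hi → hi ≤ ws.length →
    (∀ i, i < lo → ∀ h : i < ws.length, ws[i] ≤ fq) →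
    (∀ i, hi ≤ i → ∀ h : i < ws.length, fq < ws[i]) →
    pvBS ws fq lo hi ≤ ws.length ∧
    (∀ i, (h : i < ws.length) → i < pvBS ws fq lo hi → ws[i] ≤ fq) ∧
    (∀ i, (h : i < ws.length) → pvBS ws fq lo hi ≤ i → fq < ws[i]) := by
  intro lo hi hlo hhi hbelow habove
  exact pvBSAux_char ws fq hs (hi - lo) lo hi (le_refl _) hlo hhi hbelow habove


-- countP of a predicate that is false exactly on the first r indices
theorem countP_of_split (p : Int → Bool) :
    ∀ (ws : List Int) (r : Nat), r ≤ ws.length →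
    (∀ i, (h : i < ws.length) → i < r → ¬ p ws[i]) →
    (∀ i, (h : i < ws.length) → r ≤ i → p ws[i]) →
    ws.countP p = ws.length - r := by
  intro ws
  induction ws with
  | nil =>
    intro r hr _ _
    have hr0 : r = 0 := by simpa using hr
    subst hr0; simp
  | cons x t ih =>
    intro r hr hlow hhigh
    cases r with
    | zero =>
      have hx : p x := hhigh 0 (by simp) (by omega)
      rw [List.countP_cons_of_pos hx]
      have := ih 0 (by omega) (by omega)
        (fun i h _ => by simpa using hhigh (i + 1) (by simpa using Nat.succ_lt_succ h) (by omega))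
      simp at this ⊢; omega
    | succ r' =>
      have hx : ¬ p x := hlow 0 (by simp) (by omega)
      rw [List.countP_cons_of_neg hx]
      have := ih r' (by simpa using hr)
        (fun i h hir => by simpa using hlow (i + 1) (by simpa using Nat.succ_lt_succ h) (by omega))
        (fun i h hri => by simpa using hhigh (i + 1) (by simpa using Nat.succ_lt_succ h) (by omega))
      simp at this ⊢; omega

-- per-query agreement: A's break-scan of the descending list equals n minus B's search result
theorem per_query_eq (q : Int) (freqs : List Int) :
    pvLoopA q (PySem.List.sorted freqs (fun x => x) true)
      = ((PySem.List.sorted freqs (fun x => x) false).length : Int)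
        - (pvBS (PySem.List.sorted freqs (fun x => x) false) q 0
             (PySem.List.sorted freqs (fun x => x) false).length : Int) := by
  set c := PySem.List.sorted freqs (fun x => x) true with hcdef
  set ws := PySem.List.sorted freqs (fun x => x) false with hwdef
  have hcdesc : List.Pairwise (fun a b => b ≤ a) c := by
    simpa using PySem.List.sorted_pairwise_rev (xs := freqs) (key := fun x => x)
  have hwasc : List.Pairwise (fun a b => a ≤ b) ws := by
    simpa using PySem.List.sorted_pairwise (xs := freqs) (key := fun x => x)
  have hperm : c.Perm ws :=
    (PySem.List.sorted_perm (xs := freqs) (key := fun x => x) (rev := true)).trans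
      (PySem.List.sorted_perm (xs := freqs) (key := fun x => x) (rev := false)).symm
  set r := pvBS ws q 0 ws.length with hrdef
  obtain ⟨hrle, hbelow, habove⟩ :=
    pvBS_char ws q hwasc 0 ws.length (by omega) (le_refl _)
      (by omega) (fun i hi h => by omega)
  have hcount : ws.countP (fun j => decide (q < j)) = ws.length - r := by
    apply countP_of_split _ ws r hrle
    · intro i h hir
      have := hbelow i h hir
      simp; omega
    · intro i h hri
      have := habove i h hri
      simpa using this
  rw [pvLoopA_eq_countP q c hcdesc, hperm.countP_eq, hcount]
  have : r ≤ ws.length := hrle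
  push_cast [Nat.cast_sub this]
  ring

-- the two output-building folds produce the same list from any accumulator
theorem folds_eq (words : List String) :
    ∀ (qs : List String) (acc : List Int),
    (qs.map pvFreqA).foldl (fun ans di =>
        let res := pvLoopA di (PySem.List.sorted (words.map pvFreqA) (fun x => x) true)
        if 0 ≤ res then ans ++ [res] else ans) acc
    = qs.foldl (fun out q =>
        let fq := pvFreqB q
        let lo := pvBS (PySem.List.sorted (words.map pvFreqB) (fun x => x) false) fq 0
            (PySem.List.sorted (words.map pvFreqB) (fun x => x) false).length
        out ++ [((PySem.List.sorted (words.map pvFreqB) (fun x => x) false).length : Int) - (lo : Int)]) acc := by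
  intro qs
  have hfreq : pvFreqB = pvFreqA := rfl
  induction qs with
  | nil => intro acc; rfl
  | cons q qs ih =>
    intro acc
    simp only [List.map_cons, List.foldl_cons]
    rw [if_pos (pvLoopA_nonneg _ _), hfreq]
    rw [per_query_eq (pvFreqA q) (words.map pvFreqA)]
    exact ih _

-- ===== VERDICT (by name: the statement is the Claim_ definition above) =====
theorem numSmallerByFrequency_spec : Claim_equal_numSmallerByFrequency := by
  intro queries words _ _
  unfold Spec_numSmallerByFrequency numSmallerByFrequency numSmallerByFrequency_alt
  exact folds_eq words queries []
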